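-- pv_equiv track=rewrite | github.com/NikolaBlagojevic/pyrecodes_hospitals | pyrecodes_hospitals/Patient.py | length_of_last_n_elements_with_difference_one
-- ===== SOURCE A (Python) =====
-- def length_of_last_n_elements_with_difference_one(list: list) -> int:
--     if len(list) < 2:
--         return 0
--
--     count = 1
--     for i in range(len(list) - 1, 0, -1):
--         if abs(list[i] - list[i - 1]) == 1:
--             count += 1
--         else:
--             break
--     return count
-- ===== SOURCE B (Python) =====
-- def length_of_last_n_elements_with_difference_one(list: list) -> int:
--     if len(list) < 2:
--         return 0
--     run = 1
--     prev = list[0]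
--     for x in list[1:]:
--         run = run + 1 if abs(x - prev) == 1 else 1
--         prev = x
--     return run
-- ===== Notes on version B (the rewrite author's own statement) =====
-- stated objective: alternative
-- what changed: Replaces the backward scan with early break by a single forward pass that maintains the current consecutive-difference-one run (incrementing on |diff|=1, resetting to 1 otherwise) and returns the final run.
import Mathlib
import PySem

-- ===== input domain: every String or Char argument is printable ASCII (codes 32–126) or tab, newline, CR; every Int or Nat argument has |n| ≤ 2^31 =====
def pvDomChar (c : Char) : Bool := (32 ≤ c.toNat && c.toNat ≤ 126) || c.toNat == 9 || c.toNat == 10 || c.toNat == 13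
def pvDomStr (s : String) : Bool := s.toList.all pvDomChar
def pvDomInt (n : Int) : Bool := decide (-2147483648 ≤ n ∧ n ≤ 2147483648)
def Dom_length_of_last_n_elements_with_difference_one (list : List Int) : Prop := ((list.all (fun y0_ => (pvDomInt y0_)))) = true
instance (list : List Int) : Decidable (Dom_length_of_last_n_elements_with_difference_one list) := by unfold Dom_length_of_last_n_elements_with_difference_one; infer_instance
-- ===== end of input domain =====

-- B replaces A's backward early-break scan by a forward pass maintaining the current
-- consecutive-difference-one run (alternative decomposition, same cost).

-- ===== PORT A =====
-- A's loop 'for i in range(len(list)-1, 0, -1): … else break' as recursion on the index list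
def pvAGo (l : List Int) : List Int → Int → Int
  | [], count => count
  | i :: rest, count =>
    if (PySem.List.pyGetD l i 0 - PySem.List.pyGetD l (i - 1) 0).natAbs = 1 then
      pvAGo l rest (count + 1)
    else count

def length_of_last_n_elements_with_difference_one (list : List Int) : Int :=
  if list.length < 2 then 0
  else pvAGo list (PySem.List.pyRange ((list.length : Int) - 1) 0 (-1)) 1

-- ===== PORT B =====
-- B's loop 'for x in list[1:]' carrying (prev, run)
def pvBGo : List Int → Int → Int → Int
  | [], _, run => run
  | x :: rest, prev, run =>
      pvBGo rest x (if (x - prev).natAbs = 1 then run + 1 else 1)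

def length_of_last_n_elements_with_difference_one_alt (list : List Int) : Int :=
  if list.length < 2 then 0
  else
    match list with
    | [] => 0
    | h :: t => pvBGo t h 1

-- ===== PRECONDITION & SPEC =====
def Spec_length_of_last_n_elements_with_difference_one (list : List Int) (out : Int) : Prop := out = length_of_last_n_elements_with_difference_one_alt list
instance (list : List Int) (out : Int) : Decidable (Spec_length_of_last_n_elements_with_difference_one list out) := by unfold Spec_length_of_last_n_elements_with_difference_one; infer_instance

-- ===== CLAIM (what is proved, stated in full; the proofs are below) =====
def Claim_equal_length_of_last_n_elements_with_difference_one : Prop := ∀ (list : List Int), Dom_length_of_last_n_elements_with_difference_one list → Spec_length_of_last_n_elements_with_difference_one list (length_of_last_n_elements_with_difference_one list)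

-- ===== LEMMAS AND PROOFS =====

-- length (as Int) of the leading run of |diff|=1 pairs; applied to REVERSED lists below
def pvTrail : List Int → Int
  | y :: x :: rest => if (y - x).natAbs = 1 then 1 + pvTrail (x :: rest) else 1
  | _ => 1

-- Bool: all adjacent pairs differ by one
def pvChainB : List Int → Bool
  | a :: b :: t => (a - b).natAbs == 1 && pvChainB (b :: t)
  | _ => true

theorem pvChainB_iff (l : List Int) : pvChainB l = true ↔ List.IsChain (fun a b : Int => (a - b).natAbs = 1) l := by
  induction l with
  | nil => simp [pvChainB, List.isChain_nil]
  | cons a t ih =>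
    cases t with
    | nil => simp [pvChainB, List.isChain_singleton]
    | cons b r =>
      rw [List.isChain_cons_cons, ← ih]
      simp [pvChainB]

theorem pvChainB_reverse (l : List Int) : pvChainB l.reverse = pvChainB l := by
  have h : pvChainB l.reverse = true ↔ pvChainB l = true := by
    rw [pvChainB_iff, pvChainB_iff, List.isChain_reverse]
    exact List.IsChain.iff (fun a b => by constructor <;> (intro; omega))
  cases h1 : pvChainB l.reverse <;> cases h2 : pvChainB l
  · rfl
  · rw [h1, h2] at h; simp at h
  · rw [h1, h2] at h; simp at h
  · rfl

theorem pvTrail_full (l : List Int) (h : pvChainB l = true) : l ≠ [] → pvTrail l = l.length := by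
  induction l with
  | nil => intro h'; exact absurd rfl h'
  | cons y t ih =>
    intro _
    cases t with
    | nil => simp [pvTrail]
    | cons x r =>
      simp only [pvChainB, Bool.and_eq_true, beq_iff_eq] at h
      have hx := ih h.2 (by simp)
      simp only [pvTrail, if_pos h.1, hx]
      push_cast [List.length_cons]
      ring

theorem pvTrail_append (ys : List Int) (a : Int) (hne : ys ≠ []) :
    pvTrail (ys ++ [a]) = if pvChainB (ys ++ [a]) then (ys.length : Int) + 1 else pvTrail ys := by
  induction ys with
  | nil => exact absurd rfl hne
  | cons y t ih =>
    cases t with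
    | nil =>
      by_cases h : (y - a).natAbs = 1 <;> simp [pvTrail, pvChainB, h]
    | cons x r =>
      have ihx := ih (by simp)
      simp only [List.cons_append] at ihx
      simp only [List.cons_append, pvTrail, pvChainB, ihx]
      by_cases h : (y - x).natAbs = 1 <;> by_cases hc : pvChainB (x :: (r ++ [a])) = true
      · simp only [h, hc, if_pos, beq_self_eq_true, Bool.true_and, if_true]
        push_cast [List.length_cons]
        ring
      · simp [h, hc]
      · simp [h, hc]
      · simp [h, hc]

theorem pvBGo_eq (l : List Int) : ∀ (prev run : Int),
    pvBGo l prev run = if pvChainB (prev :: l) then run + (l.length : Int) else pvTrail l.reverse := by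
  induction l with
  | nil => intro prev run; simp [pvBGo, pvChainB]
  | cons x rest ih =>
    intro prev run
    simp only [pvBGo, ih]
    simp only [pvChainB]
    by_cases hc : pvChainB (x :: rest) = true
    · by_cases hd : (x - prev).natAbs = 1
      · have hd' : (prev - x).natAbs = 1 := by omega
        simp only [if_pos hd, if_pos hc, hd', hc, beq_self_eq_true, Bool.and_self, if_pos]
        push_cast [List.length_cons]
        ring
      · have hd' : ¬ (prev - x).natAbs = 1 := by omega
        rw [if_neg hd, if_pos hc, if_neg (by simp [hd'])]
        cases rest with
        | nil => simp [pvTrail]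
        | cons z r =>
          rw [show (x :: z :: r).reverse = (z :: r).reverse ++ [x] by simp]
          rw [pvTrail_append _ _ (by simp)]
          rw [if_pos (by rw [show (z :: r).reverse ++ [x] = (x :: z :: r).reverse by simp, pvChainB_reverse]; exact hc)]
          have hfull := pvTrail_full _ hc (by simp)
          simp at hfull ⊢
          omega
    · have hrne : rest ≠ [] := by
        intro h; subst h; exact hc rfl
      rw [if_neg hc, if_neg (by simp [hc])]
      obtain ⟨z, r, rfl⟩ := List.exists_cons_of_ne_nil hrne
      rw [show (x :: z :: r).reverse = (z :: r).reverse ++ [x] by simp]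
      rw [pvTrail_append _ _ (by simp)]
      rw [if_neg (by rw [show (z :: r).reverse ++ [x] = (x :: z :: r).reverse by simp, pvChainB_reverse]; exact hc)]

theorem pvAGo_eq (l : List Int) : ∀ (i : Nat), 1 ≤ i → i < l.length → ∀ (c : Int),
    pvAGo l (PySem.List.pyRange (i : Int) 0 (-1)) c = c + pvTrail ((l.take (i + 1)).reverse) - 1 := by
  intro i
  induction i with
  | zero => omega
  | succ i ih =>
    intro _ hlt c
    rw [PySem.List.pyRange_neg_one_cons (by omega : (0:Int) < ((i+1 : Nat) : Int))]
    have hi1 : i + 1 < l.length := hlt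
    have hi : i < l.length := by omega
    have hcast : ((i+1 : Nat) : Int) - 1 = ((i : Nat) : Int) := by push_cast; ring
    have hget1 : PySem.List.pyGetD l ((i+1 : Nat) : Int) 0 = l[i+1] := by
      rw [PySem.List.pyGetD_natCast]; simp [List.getD_eq_getElem?_getD, hi1]
    have hget0 : PySem.List.pyGetD l ((i : Nat) : Int) 0 = l[i] := by
      rw [PySem.List.pyGetD_natCast]; simp [List.getD_eq_getElem?_getD, hi]
    have htake2 : (l.take (i + 1 + 1)).reverse = l[i+1] :: (l.take (i + 1)).reverse := by
      rw [List.take_succ]; simp [hi1]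
    have htake1 : (l.take (i + 1)).reverse = l[i] :: (l.take i).reverse := by
      rw [List.take_succ]; simp [hi]
    simp only [pvAGo, hcast, hget1, hget0, htake2, htake1, pvTrail]
    by_cases hd : (l[i+1] - l[i]).natAbs = 1
    · rw [if_pos hd, if_pos hd]
      cases Nat.eq_or_lt_of_le (by omega : 1 ≤ i + 1) with
      | inl h1 =>
        have hi0 : i = 0 := by omega
        subst hi0
        rw [show ((0:Nat) : Int) = 0 by rfl, PySem.List.pyRange_neg_one_eq_nil (by norm_num)]
        simp [pvAGo, List.take_zero, pvTrail]
        ring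
      | inr h1 =>
        rw [ih (by omega) hi (c+1), htake1]
        ring
    · rw [if_neg hd, if_neg hd]
      ring

theorem pvA_eq_trail (l : List Int) (h : 2 ≤ l.length) :
    length_of_last_n_elements_with_difference_one l = pvTrail l.reverse := by
  unfold length_of_last_n_elements_with_difference_one
  rw [if_neg (by omega)]
  have hn : ((l.length : Int) - 1) = ((l.length - 1 : Nat) : Int) := by
    have : 1 ≤ l.length := by omega
    push_cast [this]; ring
  rw [hn, pvAGo_eq l (l.length - 1) (by omega) (by omega) 1]
  have h1 : l.length - 1 + 1 = l.length := by omega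
  rw [h1, List.take_length]
  ring

theorem pvB_eq_trail (l : List Int) (h : 2 ≤ l.length) :
    length_of_last_n_elements_with_difference_one_alt l = pvTrail l.reverse := by
  have hl : l ≠ [] := by rintro rfl; simp at h
  obtain ⟨x, t, rfl⟩ := List.exists_cons_of_ne_nil hl
  have ht : t ≠ [] := by rintro rfl; simp at h
  unfold length_of_last_n_elements_with_difference_one_alt
  rw [if_neg (by omega)]
  simp only
  rw [pvBGo_eq]
  rw [show (x :: t).reverse = t.reverse ++ [x] by simp]
  rw [pvTrail_append _ _ (by simpa using ht)]
  rw [show t.reverse ++ [x] = (x :: t).reverse by simp]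
  rw [pvChainB_reverse]
  by_cases hc : pvChainB (x :: t) = true
  · rw [if_pos hc, if_pos hc]
    push_cast [List.length_cons, List.length_reverse]
    ring
  · rw [if_neg hc, if_neg hc]

-- ===== VERDICT (by name: the statement is the Claim_ definition above) =====
theorem length_of_last_n_elements_with_difference_one_spec : Claim_equal_length_of_last_n_elements_with_difference_one := by
  intro l _
  unfold Spec_length_of_last_n_elements_with_difference_one
  by_cases h : 2 ≤ l.length
  · rw [pvA_eq_trail l h, pvB_eq_trail l h]
  · unfold length_of_last_n_elements_with_difference_one length_of_last_n_elements_with_difference_one_alt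
    rw [if_pos (by omega), if_pos (by omega)]
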